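-- pv_equiv track=rewrite | github.com/pabloschwarzenberg/grader | tema8_ej3/tema8_ej3_ecb54f45a7a961e15bef4826334b293f.py | estadisticas_frase4
-- ===== SOURCE A (Python) =====
-- def estadisticas_frase4(s):
--     b = list(s)
--     l=[]
--     while True:
--         if " " in b:
--             l.append(" ")
--             b.remove(" ")
--         else:
--             break
--     return (len(l))
-- ===== SOURCE B (Python) =====
-- def estadisticas_frase4(s):
--     n = 0
--     for c in s:
--         if c == " ":
--             n += 1
--     return n
-- ===== Notes on version B (the rewrite author's own statement) =====
-- stated objective: simpler
-- what changed: Replaces A's repeated membership-test-and-remove loop over a mutable list copy with one forward pass over the string keeping an integer counter.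
import Mathlib
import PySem

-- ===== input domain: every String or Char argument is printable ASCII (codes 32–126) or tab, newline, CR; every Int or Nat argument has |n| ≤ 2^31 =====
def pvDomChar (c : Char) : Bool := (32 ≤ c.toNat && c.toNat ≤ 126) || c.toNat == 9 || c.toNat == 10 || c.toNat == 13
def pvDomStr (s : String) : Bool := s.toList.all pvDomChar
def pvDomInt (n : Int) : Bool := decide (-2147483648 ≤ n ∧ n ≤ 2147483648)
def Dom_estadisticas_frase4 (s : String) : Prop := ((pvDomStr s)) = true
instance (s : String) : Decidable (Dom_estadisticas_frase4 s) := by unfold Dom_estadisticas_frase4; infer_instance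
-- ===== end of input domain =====

-- B counts spaces with one forward scan and a counter (simpler) instead of A's repeated membership-test-and-remove on a list copy.


-- ===== PORT A =====
-- loop: while ' ' in b: l.append(' '); b.remove(' '); termination: remove? shortens b
def pvALoop (b l : List Char) : List Char :=
  if h : ' ' ∈ b then
    match hr : PySem.List.remove? b ' ' with
    | some b' => pvALoop b' (l ++ [' '])
    | none => l
  else l
termination_by b.length
decreasing_by
  rw [PySem.List.remove?_eq_some_erase (h := h)] at hr
  cases hr
  have := List.length_erase_of_mem h
  have := List.length_pos_of_mem h
  omega

def estadisticas_frase4 (s : String) : Int :=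
  ((pvALoop s.toList []).length : Int)

-- ===== PORT B =====
def estadisticas_frase4_alt (s : String) : Int :=
  s.toList.foldl (fun n c => if c = ' ' then n + 1 else n) 0

-- ===== PRECONDITION & SPEC =====
def Spec_estadisticas_frase4 (s : String) (out : Int) : Prop := out = estadisticas_frase4_alt s
instance (s : String) (out : Int) : Decidable (Spec_estadisticas_frase4 s out) := by unfold Spec_estadisticas_frase4; infer_instance

-- ===== CLAIM (what is proved, stated in full; the proofs are below) =====
def Claim_equal_estadisticas_frase4 : Prop := ∀ (s : String), Dom_estadisticas_frase4 s → Spec_estadisticas_frase4 s (estadisticas_frase4 s)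

-- ===== LEMMAS AND PROOFS =====
lemma pvALoop_len_aux : ∀ (n : Nat) (b : List Char), b.length = n → ∀ l : List Char,
    (pvALoop b l).length = l.length + b.count ' ' := by
  intro n
  induction n using Nat.strong_induction_on with
  | _ n ih =>
    intro b hb l
    unfold pvALoop
    by_cases h : ' ' ∈ b
    · have he := PySem.List.remove?_eq_some_erase (h := h)
      have hle := List.length_erase_of_mem h
      have hpos := List.length_pos_of_mem h
      have hlt : (b.erase ' ').length < n := by omega
      simp only [h, dif_pos]
      split
      next b' hr =>
        rw [he] at hr; cases hr
        rw [ih _ hlt (b.erase ' ') rfl]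
        have := List.count_erase_self (a := ' ') (l := b)
        have hc : 1 ≤ b.count ' ' := List.one_le_count_iff.mpr h
        simp [this]
        omega
      next hr => rw [he] at hr; cases hr
    · simp [h, List.count_eq_zero.mpr h]

lemma pvALoop_len (b l : List Char) : (pvALoop b l).length = l.length + b.count ' ' :=
  pvALoop_len_aux b.length b rfl l

lemma pvFold_count (b : List Char) (n : Int) :
    b.foldl (fun n c => if c = ' ' then n + 1 else n) n = n + b.count ' ' := by
  induction b generalizing n with
  | nil => simp
  | cons c b ih =>
    by_cases h : c = ' ' <;> simp [List.foldl, h, ih,] <;> ring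

-- ===== VERDICT (by name: the statement is the Claim_ definition above) =====
theorem estadisticas_frase4_spec : Claim_equal_estadisticas_frase4 := by
  intro s _
  unfold Spec_estadisticas_frase4 estadisticas_frase4 estadisticas_frase4_alt
  rw [pvFold_count, pvALoop_len]
  simp
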